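-- pv_equiv track=rewrite | github.com/joshanashakya/dissertation | workspace/dataset/java-python/GeeksForGeeks/4641/A/2.py | longestSubsequenceCommonSegment
-- ===== SOURCE A (Python) =====
-- def longestSubsequenceCommonSegment(k, s1, s2) :
--
--     # length of strings
--     n = len(s1)
--     m = len(s2)
--
--     # declare the lcs and cnt array
--     lcs = [[0 for x in range(m + 1)] for y in range(n + 1)]
--     cnt = [[0 for x in range(m + 1)] for y in range(n + 1)]
--
--
--     # iterate from i=1 to n and j=1 to j=m
--     for i in range(1, n + 1) :
--         for j in range(1, m + 1) :
--             # stores the maximum of lcs[i-1][j] and lcs[i][j-1]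
--             lcs[i][j] = max(lcs[i - 1][j], lcs[i][j - 1])
--
--             # when both the characters are equal
--             # of s1 and s2
--             if (s1[i - 1] == s2[j - 1]):
--                 cnt[i][j] = cnt[i - 1][j - 1] + 1;
--
--             # when length of common segment is
--             # more than k, then update lcs answer
--             # by adding that segment to the answer
--             if (cnt[i][j] >= k) :
--
--                 # formulate for all length of segments
--                 # to get the longest subsequence with
--                 # consecutive Common Segment of length
--                 # of min k length
--                 for a in range(k, cnt[i][j] + 1) :
--
--                     # update lcs value by adding
--                     # segment length
--                     lcs[i][j] = max(lcs[i][j],lcs[i - a][j - a] + a)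
--
--     return lcs[n][m]
-- ===== SOURCE B (Python) =====
-- def longestSubsequenceCommonSegment(k, s1, s2):
--     # O(n*m): A's inner loop over all segment lengths a in [k, cnt] is replaced
--     # by a per-diagonal incremental maximum: best[j] = max over a >= k of
--     # lcs[i-a][j-a] + a, updated in O(1) per cell from best_prev[j-1].
--     # The lcs table is a list of rows built by appending; only the previous
--     # row's cnt/best lists are kept.
--     n, m = len(s1), len(s2)
--     rows = [[0] * (m + 1)]
--     cnt_prev = [0] * (m + 1)
--     best_prev = [0] * (m + 1)
--     for i in range(1, n + 1):
--         above = rows[i - 1]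
--         cur, cnt, best = [0], [0], [0]
--         for j in range(1, m + 1):
--             v = max(above[j], cur[j - 1])
--             c = cnt_prev[j - 1] + 1 if s1[i - 1] == s2[j - 1] else 0
--             if c >= k:
--                 b = rows[i - k][j - k] + k
--                 if c > k and best_prev[j - 1] + 1 > b:
--                     b = best_prev[j - 1] + 1
--                 if b > v:
--                     v = b
--             else:
--                 b = 0
--             cur.append(v)
--             cnt.append(c)
--             best.append(b)
--         rows.append(cur)
--         cnt_prev = cnt
--         best_prev = best
--     return rows[n][m]
-- ===== Notes on version B (the rewrite author's own statement) =====
-- stated objective: alternative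
-- what changed: A's inner loop over every admissible segment length a in [k, cnt[i][j]] is removed: B builds the lcs table as a list of appended rows and keeps per row a 'best' list with best[j] = max over a>=k of lcs[i-a][j-a]+a, updated in O(1) per cell from best_prev[j-1] along the diagonal, so each cell costs O(1) instead of O(min(n,m)); intended as faster, but a timing run did not confirm a measurable speed-up, so none is claimed.
-- outside the precondition, e.g. on longestSubsequenceCommonSegment(0, 'aa', 'abca'): A returns 2, B raises IndexError; on longestSubsequenceCommonSegment(-1, 'ab', 'ab'): A raises IndexError, B raises IndexError
import Mathlib
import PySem

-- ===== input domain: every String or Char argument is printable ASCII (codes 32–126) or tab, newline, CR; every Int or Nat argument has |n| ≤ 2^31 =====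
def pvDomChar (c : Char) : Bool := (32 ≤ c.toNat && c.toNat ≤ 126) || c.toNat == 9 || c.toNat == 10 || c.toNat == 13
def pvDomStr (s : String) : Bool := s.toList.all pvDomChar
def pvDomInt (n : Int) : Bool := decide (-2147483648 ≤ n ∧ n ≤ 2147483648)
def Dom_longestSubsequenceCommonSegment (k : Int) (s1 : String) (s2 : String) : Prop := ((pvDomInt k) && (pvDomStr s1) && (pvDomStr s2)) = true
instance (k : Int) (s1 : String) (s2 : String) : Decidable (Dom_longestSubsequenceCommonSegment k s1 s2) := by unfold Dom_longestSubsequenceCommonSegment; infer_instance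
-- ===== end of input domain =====

-- B removes A's inner loop over all segment lengths by a per-diagonal O(1) incremental
-- maximum (each cell O(1) instead of a loop over segment lengths); intended as faster, but the
-- timing run did not confirm a measurable speed-up, so none is claimed; equal results proved on Pre_.

-- ===== PORT A =====
-- A's tables lcs/cnt are modelled as total functions Int → Int → Int (initially 0, pointwise
-- update), read/written at exactly the indices A reads/writes; for k ≥ 1 (Pre_) every access
-- A makes is in range, so this is exact there.
def stepA (k : Int) (c1 c2 : List Char) (st : (Int → Int → Int) × (Int → Int → Int))
    (i j : Int) : (Int → Int → Int) × (Int → Int → Int) :=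
  let L := st.1
  let C := st.2
  -- lcs[i][j] = max(lcs[i-1][j], lcs[i][j-1])
  let v0 := max (L (i - 1) j) (L i (j - 1))
  -- if s1[i-1] == s2[j-1]: cnt[i][j] = cnt[i-1][j-1] + 1
  let c : Int := if c1.getD (i - 1).toNat ' ' = c2.getD (j - 1).toNat ' ' then C (i - 1) (j - 1) + 1 else 0
  let C' : Int → Int → Int := fun x y => if x = i ∧ y = j then c else C x y
  -- if cnt[i][j] >= k: for a in range(k, cnt[i][j] + 1): lcs[i][j] = max(lcs[i][j], lcs[i-a][j-a] + a)
  let v : Int := if k ≤ c then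
      (PySem.List.pyRange k (c + 1) 1).foldl (fun v a => max v (L (i - a) (j - a) + a)) v0
    else v0
  let L' : Int → Int → Int := fun x y => if x = i ∧ y = j then v else L x y
  (L', C')

def rowA (k : Int) (c1 c2 : List Char) (m : Int) (i : Int)
    (st : (Int → Int → Int) × (Int → Int → Int)) : (Int → Int → Int) × (Int → Int → Int) :=
  (PySem.List.pyRange 1 (m + 1) 1).foldl (fun st j => stepA k c1 c2 st i j) st

def longestSubsequenceCommonSegment (k : Int) (s1 : String) (s2 : String) : Int :=
  let c1 := s1.toList
  let c2 := s2.toList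
  let n : Int := (c1.length : Int)
  let m : Int := (c2.length : Int)
  let st := (PySem.List.pyRange 1 (n + 1) 1).foldl (fun st i => rowA k c1 c2 m i st)
    (fun _ _ => 0, fun _ _ => 0)
  st.1 n m

-- ===== PORT B =====
-- Source B builds the lcs table as a list of rows (each row a List Int grown by append);
-- cnt/best of the previous row are plain List Int.
def stepB (k : Int) (c1 c2 : List Char) (rows : List (List Int)) (cp bp : List Int)
    (st : List Int × List Int × List Int) (i j : Int) :
    List Int × List Int × List Int :=
  let cur := st.1
  let cnt := st.2.1
  let best := st.2.2
  -- v = max(above[j], cur[j-1])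
  let v0 : Int := max ((rows.getD (i - 1).toNat []).getD j.toNat 0) (cur.getD (j - 1).toNat 0)
  -- c = cnt_prev[j-1] + 1 if s1[i-1] == s2[j-1] else 0
  let c : Int := if c1.getD (i - 1).toNat ' ' = c2.getD (j - 1).toNat ' ' then cp.getD (j - 1).toNat 0 + 1 else 0
  if k ≤ c then
    -- b = rows[i-k][j-k] + k, improved by best_prev[j-1] + 1 when c > k
    let b0 : Int := (rows.getD (i - k).toNat []).getD (j - k).toNat 0 + k
    let b : Int := if k < c ∧ b0 < bp.getD (j - 1).toNat 0 + 1 then bp.getD (j - 1).toNat 0 + 1 else b0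
    (cur ++ [if v0 < b then b else v0], cnt ++ [c], best ++ [b])
  else
    (cur ++ [v0], cnt ++ [c], best ++ [0])

def rowsB (k : Int) (c1 c2 : List Char) (m : Int)
    (st : List (List Int) × List Int × List Int) (i : Int) :
    List (List Int) × List Int × List Int :=
  let t := (PySem.List.pyRange 1 (m + 1) 1).foldl
    (fun t j => stepB k c1 c2 st.1 st.2.1 st.2.2 t i j) ([0], [0], [0])
  (st.1 ++ [t.1], t.2.1, t.2.2)

def longestSubsequenceCommonSegment_alt (k : Int) (s1 : String) (s2 : String) : Int :=
  let c1 := s1.toList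
  let c2 := s2.toList
  let n : Int := (c1.length : Int)
  let m : Int := (c2.length : Int)
  let zero : List Int := List.replicate (m + 1).toNat 0
  let st := (PySem.List.pyRange 1 (n + 1) 1).foldl (fun st i => rowsB k c1 c2 m st i)
    ([zero], zero, zero)
  (st.1.getD n.toNat []).getD m.toNat 0

-- ===== PRECONDITION & SPEC =====
-- Pre_ excludes k ≤ 0 with both strings nonempty, outside the natural domain of a
-- minimum-segment-length parameter: there A raises IndexError (k < 0) or returns the
-- degenerate k = 0 reading (a zero-length segment makes every match count), while B's row
-- list, which only holds the rows already finished, raises IndexError on its rows[i-k] access.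
def Pre_longestSubsequenceCommonSegment (k : Int) (s1 : String) (s2 : String) : Prop := 1 ≤ k ∨ s1 = "" ∨ s2 = ""
instance (k : Int) (s1 : String) (s2 : String) : Decidable (Pre_longestSubsequenceCommonSegment k s1 s2) := by unfold Pre_longestSubsequenceCommonSegment; infer_instance

def pvWitness_longestSubsequenceCommonSegment : Int × String × String := (2, "ababc", "abcbc")

def Spec_longestSubsequenceCommonSegment (k : Int) (s1 : String) (s2 : String) (out : Int) : Prop := out = longestSubsequenceCommonSegment_alt k s1 s2
instance (k : Int) (s1 : String) (s2 : String) (out : Int) : Decidable (Spec_longestSubsequenceCommonSegment k s1 s2 out) := by unfold Spec_longestSubsequenceCommonSegment; infer_instance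

-- ===== CLAIM (what is proved, stated in full; the proofs are below) =====
def Claim_equal_longestSubsequenceCommonSegment : Prop := ∀ (k : Int) (s1 : String) (s2 : String), Dom_longestSubsequenceCommonSegment k s1 s2 → Pre_longestSubsequenceCommonSegment k s1 s2 → Spec_longestSubsequenceCommonSegment k s1 s2 (longestSubsequenceCommonSegment k s1 s2)

-- ===== LEMMAS AND PROOFS =====

-- The mathematical DP tables, defined by recursion on the cell.
def specC (c1 c2 : List Char) : Nat → Nat → Int
  | 0, _ => 0
  | _ + 1, 0 => 0
  | i + 1, j + 1 => if c1.getD i ' ' = c2.getD j ' ' then specC c1 c2 i j + 1 else 0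

mutual
def specL (k : Int) (c1 c2 : List Char) : Nat → Nat → Int
  | 0, _ => 0
  | _ + 1, 0 => 0
  | i + 1, j + 1 =>
    let v0 := max (specL k c1 c2 i (j + 1)) (specL k c1 c2 (i + 1) j)
    if 1 ≤ k ∧ k ≤ specC c1 c2 (i + 1) (j + 1) then max v0 (specF k c1 c2 (i + 1) (j + 1)) else v0
termination_by i j => (i + j, 1)
decreasing_by
  all_goals (simp_wf; first
    | (apply Prod.Lex.left; omega)
    | (apply Prod.Lex.right; omega)
    | omega)
def specF (k : Int) (c1 c2 : List Char) : Nat → Nat → Int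
  | 0, _ => 0
  | _ + 1, 0 => 0
  | i + 1, j + 1 =>
    let b := specL k c1 c2 (i + 1 - max k.toNat 1) (j + 1 - max k.toNat 1) + k
    if k < specC c1 c2 (i + 1) (j + 1) then max b (specF k c1 c2 i j + 1) else b
termination_by i j => (i + j, 0)
decreasing_by
  all_goals (simp_wf; first
    | (apply Prod.Lex.left; omega)
    | (apply Prod.Lex.right; omega)
    | omega)
end

theorem specC_le (c1 c2 : List Char) (i j : Nat) : 0 ≤ specC c1 c2 i j ∧ specC c1 c2 i j ≤ min i j := by
  induction i generalizing j with
  | zero => simp [specC]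
  | succ i ih =>
    cases j with
    | zero => simp [specC]
    | succ j =>
      have h := ih j
      rw [specC]
      split <;> simp <;> omega

theorem specC_succ (c1 c2 : List Char) (i j : Nat) (h : 1 ≤ specC c1 c2 (i+1) (j+1)) :
    specC c1 c2 (i+1) (j+1) = specC c1 c2 i j + 1 := by
  rw [specC] at h ⊢
  split at h <;> simp_all

-- running maximum of T over the k-based integer range, as a recursion on the length
def nmax (T : Int → Int) (k : Int) : Nat → Int
  | 0 => T k
  | d + 1 => max (nmax T k d) (T (k + d + 1))

theorem fold_eq_nmax (T : Int → Int) (k : Int) (d : Nat) (v0 : Int) :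
    (PySem.List.pyRange k (k + d + 1) 1).foldl (fun v a => max v (T a)) v0 = max v0 (nmax T k d) := by
  induction d generalizing v0 with
  | zero =>
    rw [show k + ((0:Nat):Int) + 1 = k + 1 by omega, PySem.List.pyRange_one_singleton]
    rfl
  | succ d ih =>
    rw [show k + ((d+1:Nat):Int) + 1 = (k + d + 1) + 1 by push_cast; omega,
      PySem.List.pyRange_one_succ_right (by omega), List.foldl_append, ih]
    show max (max v0 (nmax T k d)) (T (k + ↑d + 1)) = max v0 (nmax T k (d + 1))
    rw [nmax]
    omega

theorem nmax_shift (T T' : Int → Int) (k : Int) (h : ∀ a, T (a + 1) = T' a + 1) (d : Nat) :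
    nmax T k (d + 1) = max (T k) (nmax T' k d + 1) := by
  induction d with
  | zero =>
    have h0 := h k
    show max (T k) (T (k + ((0:Nat):Int) + 1)) = _
    rw [show k + ((0:Nat):Int) + 1 = k + 1 by omega, h0]
    rfl
  | succ d ih =>
    have h2 := h (k + d + 1)
    show max (nmax T k (d + 1)) (T (k + ((d+1:Nat):Int) + 1)) = _
    rw [show k + ((d+1:Nat):Int) + 1 = (k + d + 1) + 1 by push_cast; omega, h2, ih, nmax]
    omega

-- the diagonal term function at cell (i, j)
def Tf (k : Int) (c1 c2 : List Char) (i j : Nat) : Int → Int :=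
  fun a => specL k c1 c2 ((i : Int) - a).toNat ((j : Int) - a).toNat + a

theorem specF_eq_nmax (k : Int) (c1 c2 : List Char) (hk : 1 ≤ k) :
    ∀ (d : Nat) (i j : Nat), k + d = specC c1 c2 i j →
    specF k c1 c2 i j = nmax (Tf k c1 c2 i j) k d := by
  intro d
  induction d with
  | zero =>
    intro i j hc
    have hle := specC_le c1 c2 i j
    obtain ⟨i, rfl⟩ : ∃ i', i = i' + 1 := ⟨i - 1, by omega⟩
    obtain ⟨j, rfl⟩ : ∃ j', j = j' + 1 := ⟨j - 1, by omega⟩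
    rw [specF, if_neg (by omega), nmax]
    show _ = Tf k c1 c2 (i+1) (j+1) k
    simp only [Tf]
    have h1 : i + 1 - max k.toNat 1 = ((↑(i+1) : Int) - k).toNat := by omega
    have h2 : j + 1 - max k.toNat 1 = ((↑(j+1) : Int) - k).toNat := by omega
    rw [h1, h2]
  | succ d ih =>
    intro i j hc
    have hle := specC_le c1 c2 i j
    obtain ⟨i, rfl⟩ : ∃ i', i = i' + 1 := ⟨i - 1, by omega⟩
    obtain ⟨j, rfl⟩ : ∃ j', j = j' + 1 := ⟨j - 1, by omega⟩
    have hcs : specC c1 c2 i j = k + d := by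
      have := specC_succ c1 c2 i j (by omega)
      omega
    rw [specF, if_pos (by omega)]
    have hshift : ∀ a, Tf k c1 c2 (i+1) (j+1) (a + 1) = Tf k c1 c2 i j a + 1 := by
      intro a
      simp only [Tf]
      have e1 : ((↑(i+1) : Int) - (a + 1)).toNat = ((i:Int) - a).toNat := by omega
      have e2 : ((↑(j+1) : Int) - (a + 1)).toNat = ((j:Int) - a).toNat := by omega
      rw [e1, e2]
      omega
    rw [nmax_shift _ _ _ hshift, ← ih i j hcs.symm]
    have hb : Tf k c1 c2 (i+1) (j+1) k = specL k c1 c2 (i + 1 - max k.toNat 1) (j + 1 - max k.toNat 1) + k := by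
      simp only [Tf]
      have h1 : ((↑(i+1) : Int) - k).toNat = i + 1 - max k.toNat 1 := by omega
      have h2 : ((↑(j+1) : Int) - k).toNat = j + 1 - max k.toNat 1 := by omega
      rw [h1, h2]
    rw [hb]


-- ===== invariant for PORT A =====
def InvA (k : Int) (c1 c2 : List Char) (L C : Int → Int → Int) (i j : Int) : Prop :=
  ∀ (x y : Nat), x ≤ c1.length → y ≤ c2.length →
    ((x:Int) < i ∨ ((x:Int) = i ∧ (y:Int) < j) ∨ x = 0 ∨ y = 0) →
    L x y = specL k c1 c2 x y ∧ C x y = specC c1 c2 x y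

theorem InvA_mono (k : Int) (c1 c2 : List Char) (L C : Int → Int → Int) (i j j' : Int)
    (hj : j' ≤ j) (h : InvA k c1 c2 L C i j) : InvA k c1 c2 L C i j' := by
  intro x y hx hy hc
  exact h x y hx hy (by omega)

theorem InvA_mono_i (k : Int) (c1 c2 : List Char) (L C : Int → Int → Int) (i i' : Int)
    (hi : i' ≤ i) (h : InvA k c1 c2 L C i 1) : InvA k c1 c2 L C i' 1 := by
  intro x y hx hy hc
  exact h x y hx hy (by omega)

theorem InvA_next (k : Int) (c1 c2 : List Char) (L C : Int → Int → Int) (i : Int)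
    (h : InvA k c1 c2 L C i ((c2.length : Int) + 1)) : InvA k c1 c2 L C (i + 1) 1 := by
  intro x y hx hy hc
  exact h x y hx hy (by omega)

-- the computed cell values are the spec values, and the invariant advances
theorem stepA_inv (k : Int) (c1 c2 : List Char) (hk : 1 ≤ k)
    (st : (Int → Int → Int) × (Int → Int → Int)) (i j : Int)
    (hi1 : 1 ≤ i) (hin : i ≤ (c1.length : Int)) (hj1 : 1 ≤ j) (hjm : j ≤ (c2.length : Int))
    (h : InvA k c1 c2 st.1 st.2 i j) :
    InvA k c1 c2 (stepA k c1 c2 st i j).1 (stepA k c1 c2 st i j).2 i (j + 1) := by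
  obtain ⟨L, C⟩ := st
  obtain ⟨x', hx'⟩ : ∃ x', i = ((x' + 1 : Nat) : Int) := ⟨i.toNat - 1, by omega⟩
  obtain ⟨y', hy'⟩ : ∃ y', j = ((y' + 1 : Nat) : Int) := ⟨j.toNat - 1, by omega⟩
  subst hx'; subst hy'
  have hxb : x' + 1 ≤ c1.length := by omega
  have hyb : y' + 1 ≤ c2.length := by omega
  -- the read cells are already final
  have hC : C ((x' + 1 : Nat) - 1) ((y' + 1 : Nat) - 1) = specC c1 c2 x' y' := by
    have e1 : (((x' + 1 : Nat) : Int) - 1) = ((x' : Nat) : Int) := by omega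
    have e2 : (((y' + 1 : Nat) : Int) - 1) = ((y' : Nat) : Int) := by omega
    rw [e1, e2]
    exact (h x' y' (by omega) (by omega) (by omega)).2
  have hLup : L (((x' + 1 : Nat) : Int) - 1) ((y' + 1 : Nat) : Int) = specL k c1 c2 x' (y' + 1) := by
    have e1 : (((x' + 1 : Nat) : Int) - 1) = ((x' : Nat) : Int) := by omega
    rw [e1]
    exact (h x' (y' + 1) (by omega) (by omega) (by omega)).1
  have hLleft : L (((x' + 1 : Nat) : Int)) (((y' + 1 : Nat) : Int) - 1) = specL k c1 c2 (x' + 1) y' := by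
    have e2 : (((y' + 1 : Nat) : Int) - 1) = ((y' : Nat) : Int) := by omega
    rw [e2]
    exact (h (x' + 1) y' (by omega) (by omega) (by omega)).1
  -- the computed cnt is specC
  have hcval : (if c1.getD (((x' + 1 : Nat) : Int) - 1).toNat ' ' = c2.getD (((y' + 1 : Nat) : Int) - 1).toNat ' '
      then C (((x' + 1 : Nat) : Int) - 1) (((y' + 1 : Nat) : Int) - 1) + 1 else 0) = specC c1 c2 (x' + 1) (y' + 1) := by
    rw [specC]
    have e1 : (((x' + 1 : Nat) : Int) - 1).toNat = x' := by omega
    have e2 : (((y' + 1 : Nat) : Int) - 1).toNat = y' := by omega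
    rw [e1, e2, hC]
  have hcle := specC_le c1 c2 (x' + 1) (y' + 1)
  -- the computed lcs value is specL
  have hvval : (if k ≤ specC c1 c2 (x' + 1) (y' + 1) then
        (PySem.List.pyRange k (specC c1 c2 (x' + 1) (y' + 1) + 1) 1).foldl
          (fun v a => max v (L (((x' + 1 : Nat) : Int) - a) (((y' + 1 : Nat) : Int) - a) + a))
          (max (L (((x' + 1 : Nat) : Int) - 1) ((y' + 1 : Nat) : Int)) (L ((x' + 1 : Nat) : Int) (((y' + 1 : Nat) : Int) - 1)))
      else
        max (L (((x' + 1 : Nat) : Int) - 1) ((y' + 1 : Nat) : Int)) (L ((x' + 1 : Nat) : Int) (((y' + 1 : Nat) : Int) - 1)))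
      = specL k c1 c2 (x' + 1) (y' + 1) := by
    rw [hLup, hLleft, specL]
    by_cases hkc : k ≤ specC c1 c2 (x' + 1) (y' + 1)
    · rw [if_pos hkc, if_pos ⟨hk, hkc⟩]
      have hfc : (PySem.List.pyRange k (specC c1 c2 (x' + 1) (y' + 1) + 1) 1).foldl
          (fun v a => max v (L (((x' + 1 : Nat) : Int) - a) (((y' + 1 : Nat) : Int) - a) + a))
          (max (specL k c1 c2 x' (y' + 1)) (specL k c1 c2 (x' + 1) y'))
        = (PySem.List.pyRange k (specC c1 c2 (x' + 1) (y' + 1) + 1) 1).foldl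
          (fun v a => max v (Tf k c1 c2 (x' + 1) (y' + 1) a))
          (max (specL k c1 c2 x' (y' + 1)) (specL k c1 c2 (x' + 1) y')) := by
        apply PySem.List.foldl_congr_mem
        intro acc a ha
        rw [PySem.List.mem_pyRange_one] at ha
        have hfin : L (((x' + 1 : Nat) : Int) - a) (((y' + 1 : Nat) : Int) - a)
            = specL k c1 c2 (((x' + 1 : Nat) : Int) - a).toNat (((y' + 1 : Nat) : Int) - a).toNat := by
          have e1 : (((x' + 1 : Nat) : Int) - a) = (((((x' + 1 : Nat) : Int) - a).toNat : Nat) : Int) := by omega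
          have e2 : (((y' + 1 : Nat) : Int) - a) = (((((y' + 1 : Nat) : Int) - a).toNat : Nat) : Int) := by omega
          rw [e1, e2]
          exact (h _ _ (by omega) (by omega) (by omega)).1
        rw [hfin, Tf]
      rw [hfc]
      obtain ⟨d, hd⟩ : ∃ d : Nat, specC c1 c2 (x' + 1) (y' + 1) = k + d :=
        ⟨(specC c1 c2 (x' + 1) (y' + 1) - k).toNat, by omega⟩
      rw [hd, fold_eq_nmax, ← specF_eq_nmax k c1 c2 hk d (x' + 1) (y' + 1) hd.symm]
    · rw [if_neg hkc, if_neg (by omega)]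
  intro x y hx hy hc
  simp only [stepA, hcval, hvval]
  by_cases he : ((x : Nat) : Int) = ((x' + 1 : Nat) : Int) ∧ ((y : Nat) : Int) = ((y' + 1 : Nat) : Int)
  · rw [if_pos he, if_pos he]
    have ex : x = x' + 1 := by omega
    have ey : y = y' + 1 := by omega
    rw [ex, ey]
    exact ⟨rfl, rfl⟩
  · rw [if_neg he, if_neg he]
    exact h x y hx hy (by omega)

theorem rowA_inv (k : Int) (c1 c2 : List Char) (hk : 1 ≤ k) (i : Int)
    (hi1 : 1 ≤ i) (hin : i ≤ (c1.length : Int)) :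
    ∀ (d : Nat) (j : Int) (st : (Int → Int → Int) × (Int → Int → Int)),
    ((c2.length : Int) + 1 - j).toNat = d → 1 ≤ j → InvA k c1 c2 st.1 st.2 i j →
    InvA k c1 c2
      ((PySem.List.pyRange j ((c2.length : Int) + 1) 1).foldl (fun st j => stepA k c1 c2 st i j) st).1
      ((PySem.List.pyRange j ((c2.length : Int) + 1) 1).foldl (fun st j => stepA k c1 c2 st i j) st).2
      i ((c2.length : Int) + 1) := by
  intro d
  induction d with
  | zero =>
    intro j st hd hj h
    rw [PySem.List.pyRange_one_eq_nil (by omega)]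
    exact InvA_mono k c1 c2 st.1 st.2 i j _ (by omega) h
  | succ d ih =>
    intro j st hd hj h
    rw [PySem.List.pyRange_one_cons (by omega)]
    simp only [List.foldl_cons]
    exact ih (j + 1) _ (by omega) (by omega)
      (stepA_inv k c1 c2 hk st i j hi1 hin hj (by omega) h)

theorem outerA_inv (k : Int) (c1 c2 : List Char) (hk : 1 ≤ k) :
    ∀ (d : Nat) (i : Int) (st : (Int → Int → Int) × (Int → Int → Int)),
    ((c1.length : Int) + 1 - i).toNat = d → 1 ≤ i → InvA k c1 c2 st.1 st.2 i 1 →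
    InvA k c1 c2
      ((PySem.List.pyRange i ((c1.length : Int) + 1) 1).foldl (fun st i => rowA k c1 c2 (c2.length : Int) i st) st).1
      ((PySem.List.pyRange i ((c1.length : Int) + 1) 1).foldl (fun st i => rowA k c1 c2 (c2.length : Int) i st) st).2
      ((c1.length : Int) + 1) 1 := by
  intro d
  induction d with
  | zero =>
    intro i st hd hi h
    rw [PySem.List.pyRange_one_eq_nil (by omega)]
    exact InvA_mono_i k c1 c2 st.1 st.2 i _ (by omega) h
  | succ d ih =>
    intro i st hd hi h
    rw [PySem.List.pyRange_one_cons (by omega)]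
    simp only [List.foldl_cons]
    refine ih (i + 1) _ (by omega) (by omega) ?_
    exact InvA_next k c1 c2 _ _ i
      (rowA_inv k c1 c2 hk i hi (by omega) ((c2.length : Int) + 1 - 1).toNat 1 st (by omega) (by omega) h)

theorem portA_eq (k : Int) (s1 s2 : String) (hk : 1 ≤ k) :
    longestSubsequenceCommonSegment k s1 s2
      = specL k s1.toList s2.toList s1.toList.length s2.toList.length := by
  have hinit : InvA k s1.toList s2.toList (fun _ _ => 0) (fun _ _ => 0) 1 1 := by
    intro x y hx hy hc
    have hx0 : x = 0 ∨ y = 0 := by omega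
    rcases hx0 with rfl | rfl
    · cases y <;> simp [specL, specC]
    · cases x <;> simp [specL, specC]
  have h := outerA_inv k s1.toList s2.toList hk ((s1.toList.length : Int) + 1 - 1).toNat 1
    (fun _ _ => 0, fun _ _ => 0) (by omega) (by omega) hinit
  have := (h s1.toList.length s2.toList.length (by omega) (by omega) (by omega)).1
  simpa [longestSubsequenceCommonSegment, rowA] using this


-- ===== lemmas and invariant for PORT B =====

-- reading a mapped range list
theorem getD_range_map {α : Type} (f : Nat → α) (d : α) (n y : Nat) (hy : y < n) :
    ((List.range n).map f).getD y d = f y := by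
  rw [List.getD_eq_getElem?_getD, List.getElem?_map, List.getElem?_range hy]
  rfl

-- the finished rows of the spec tables, as lists
def rowL (k : Int) (c1 c2 : List Char) (m i : Nat) : List Int :=
  (List.range (m + 1)).map (fun y => specL k c1 c2 i y)

def rowC (c1 c2 : List Char) (m i : Nat) : List Int :=
  (List.range (m + 1)).map (fun y => specC c1 c2 i y)

def rowF (k : Int) (c1 c2 : List Char) (m i : Nat) : List Int :=
  (List.range (m + 1)).map (fun y => if k ≤ specC c1 c2 i y then specF k c1 c2 i y else 0)

theorem specC_zero_right (c1 c2 : List Char) (r : Nat) : specC c1 c2 r 0 = 0 := by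
  cases r <;> rfl

theorem specL_zero (k : Int) (c1 c2 : List Char) (x y : Nat) (h : x = 0 ∨ y = 0) :
    specL k c1 c2 x y = 0 := by
  rcases h with rfl | rfl
  · cases y <;> simp [specL]
  · cases x <;> simp [specL]

-- one inner step of B: the three partial row lists each grow by their next spec value
theorem stepB_spec (k : Int) (c1 c2 : List Char) (hk : 1 ≤ k) (m : Nat) (hm : m = c2.length)
    (i : Nat) (hi1 : 1 ≤ i) (hin : i ≤ c1.length)
    (rows : List (List Int)) (hrows : rows = (List.range i).map (rowL k c1 c2 m))
    (j : Nat) (hj1 : 1 ≤ j) (hjm : j ≤ m) :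
    stepB k c1 c2 rows (rowC c1 c2 m (i - 1)) (rowF k c1 c2 m (i - 1))
      ((List.range j).map (fun y => specL k c1 c2 i y),
       (List.range j).map (fun y => specC c1 c2 i y),
       (List.range j).map (fun y => if k ≤ specC c1 c2 i y then specF k c1 c2 i y else 0))
      (i : Int) (j : Int)
      = ((List.range (j + 1)).map (fun y => specL k c1 c2 i y),
         (List.range (j + 1)).map (fun y => specC c1 c2 i y),
         (List.range (j + 1)).map (fun y => if k ≤ specC c1 c2 i y then specF k c1 c2 i y else 0)) := by
  obtain ⟨x', rfl⟩ : ∃ x', i = x' + 1 := ⟨i - 1, by omega⟩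
  obtain ⟨y', rfl⟩ : ∃ y', j = y' + 1 := ⟨j - 1, by omega⟩
  have hid : ((x' + 1 : Nat) : Int) - 1 = ((x' : Nat) : Int) := by omega
  have hjd : ((y' + 1 : Nat) : Int) - 1 = ((y' : Nat) : Int) := by omega
  have hprev : (x' + 1) - 1 = x' := by omega
  -- reads
  have habove : (rows.getD (((x' + 1 : Nat) : Int) - 1).toNat []).getD ((y' + 1 : Nat) : Int).toNat 0
      = specL k c1 c2 x' (y' + 1) := by
    rw [hid, Int.toNat_natCast, hrows, getD_range_map _ _ _ _ (by omega), rowL,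
      Int.toNat_natCast, getD_range_map _ _ _ _ (by omega)]
  have hcur : (((List.range (y' + 1)).map (fun y => specL k c1 c2 (x' + 1) y)).getD
      (((y' + 1 : Nat) : Int) - 1).toNat 0) = specL k c1 c2 (x' + 1) y' := by
    rw [hjd, Int.toNat_natCast, getD_range_map _ _ _ _ (by omega)]
  have hcp : (rowC c1 c2 m x').getD (((y' + 1 : Nat) : Int) - 1).toNat 0 = specC c1 c2 x' y' := by
    rw [hjd, Int.toNat_natCast, rowC, getD_range_map _ _ _ _ (by omega)]
  have hcval : (if c1.getD (((x' + 1 : Nat) : Int) - 1).toNat ' ' = c2.getD (((y' + 1 : Nat) : Int) - 1).toNat ' '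
      then (rowC c1 c2 m x').getD (((y' + 1 : Nat) : Int) - 1).toNat 0 + 1 else 0)
      = specC c1 c2 (x' + 1) (y' + 1) := by
    rw [specC, hcp]
    have e1 : (((x' + 1 : Nat) : Int) - 1).toNat = x' := by omega
    have e2 : (((y' + 1 : Nat) : Int) - 1).toNat = y' := by omega
    rw [e1, e2]
  have hcle := specC_le c1 c2 (x' + 1) (y' + 1)
  simp only [stepB, hprev, hcval, habove, hcur]
  by_cases hkc : k ≤ specC c1 c2 (x' + 1) (y' + 1)
  · rw [if_pos hkc]
    have hdiag : (rows.getD (((x' + 1 : Nat) : Int) - k).toNat []).getD (((y' + 1 : Nat) : Int) - k).toNat 0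
        = specL k c1 c2 (x' + 1 - max k.toNat 1) (y' + 1 - max k.toNat 1) := by
      have e1 : (((x' + 1 : Nat) : Int) - k).toNat = x' + 1 - max k.toNat 1 := by omega
      have e2 : (((y' + 1 : Nat) : Int) - k).toNat = y' + 1 - max k.toNat 1 := by omega
      rw [e1, e2, hrows, getD_range_map _ _ _ _ (by omega), rowL,
        getD_range_map _ _ _ _ (by omega)]
    have hbp : (rowF k c1 c2 m x').getD (((y' + 1 : Nat) : Int) - 1).toNat 0
        = (if k ≤ specC c1 c2 x' y' then specF k c1 c2 x' y' else 0) := by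
      rw [hjd, Int.toNat_natCast, rowF, getD_range_map _ _ _ _ (by omega)]
    have hbval : (if k < specC c1 c2 (x' + 1) (y' + 1) ∧
          (rows.getD (((x' + 1 : Nat) : Int) - k).toNat []).getD (((y' + 1 : Nat) : Int) - k).toNat 0 + k
            < (rowF k c1 c2 m x').getD (((y' + 1 : Nat) : Int) - 1).toNat 0 + 1
          then (rowF k c1 c2 m x').getD (((y' + 1 : Nat) : Int) - 1).toNat 0 + 1
          else (rows.getD (((x' + 1 : Nat) : Int) - k).toNat []).getD (((y' + 1 : Nat) : Int) - k).toNat 0 + k)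
        = specF k c1 c2 (x' + 1) (y' + 1) := by
      rw [hdiag, hbp, specF]
      by_cases hsk : k < specC c1 c2 (x' + 1) (y' + 1)
      · have hcs : specC c1 c2 x' y' = specC c1 c2 (x' + 1) (y' + 1) - 1 := by
          have := specC_succ c1 c2 x' y' (by omega)
          omega
        rw [if_pos hsk, if_pos (by omega : k ≤ specC c1 c2 x' y')]
        split_ifs <;> omega
      · rw [if_neg hsk, if_neg (fun h : _ ∧ _ => hsk h.1)]
    rw [hbval]
    have hLval : (if max (specL k c1 c2 x' (y' + 1)) (specL k c1 c2 (x' + 1) y')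
          < specF k c1 c2 (x' + 1) (y' + 1)
        then specF k c1 c2 (x' + 1) (y' + 1)
        else max (specL k c1 c2 x' (y' + 1)) (specL k c1 c2 (x' + 1) y'))
        = specL k c1 c2 (x' + 1) (y' + 1) := by
      rw [specL]
      have hc' : (1 ≤ k ∧ k ≤ specC c1 c2 (x' + 1) (y' + 1)) := ⟨hk, hkc⟩
      simp only [if_pos hc']
      split_ifs <;> omega
    have hFval : (if k ≤ specC c1 c2 (x' + 1) (y' + 1) then specF k c1 c2 (x' + 1) (y' + 1) else 0)
        = specF k c1 c2 (x' + 1) (y' + 1) := if_pos hkc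
    simp only [List.range_succ, List.map_append, List.map_cons, List.map_nil, hLval, hFval]
  · rw [if_neg hkc]
    have hLval : max (specL k c1 c2 x' (y' + 1)) (specL k c1 c2 (x' + 1) y')
        = specL k c1 c2 (x' + 1) (y' + 1) := by
      rw [specL]
      have hc' : ¬ (1 ≤ k ∧ k ≤ specC c1 c2 (x' + 1) (y' + 1)) := fun h => hkc h.2
      simp only [if_neg hc']
    have hFval : (if k ≤ specC c1 c2 (x' + 1) (y' + 1) then specF k c1 c2 (x' + 1) (y' + 1) else 0)
        = (0 : Int) := if_neg hkc
    simp only [List.range_succ, List.map_append, List.map_cons, List.map_nil, hLval, hFval]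

-- the inner fold of B finishes the three rows
theorem rowB_fold (k : Int) (c1 c2 : List Char) (hk : 1 ≤ k) (m : Nat) (hm : m = c2.length)
    (i : Nat) (hi1 : 1 ≤ i) (hin : i ≤ c1.length)
    (rows : List (List Int)) (hrows : rows = (List.range i).map (rowL k c1 c2 m)) :
    ∀ (d : Nat) (j : Nat), 1 ≤ j → j + d = m + 1 →
    (PySem.List.pyRange (j : Int) ((m : Int) + 1) 1).foldl
      (fun t jj => stepB k c1 c2 rows (rowC c1 c2 m (i - 1)) (rowF k c1 c2 m (i - 1)) t (i : Int) jj)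
      ((List.range j).map (fun y => specL k c1 c2 i y),
       (List.range j).map (fun y => specC c1 c2 i y),
       (List.range j).map (fun y => if k ≤ specC c1 c2 i y then specF k c1 c2 i y else 0))
    = (rowL k c1 c2 m i, rowC c1 c2 m i, rowF k c1 c2 m i) := by
  intro d
  induction d with
  | zero =>
    intro j hj1 hjd
    have hj : j = m + 1 := by omega
    subst hj
    rw [PySem.List.pyRange_one_eq_nil (by omega)]
    rfl
  | succ d ih =>
    intro j hj1 hjd
    rw [PySem.List.pyRange_one_cons (by omega)]
    simp only [List.foldl_cons]
    rw [stepB_spec k c1 c2 hk m hm i hi1 hin rows hrows j hj1 (by omega)]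
    have := ih (j + 1) (by omega) (by omega)
    rw [show ((j : Nat) : Int) + 1 = (((j + 1 : Nat)) : Int) by push_cast; ring] at *
    exact this

-- the outer fold of B accumulates the full list of finished rows
theorem outerB_fold (k : Int) (c1 c2 : List Char) (hk : 1 ≤ k) (m : Nat) (hm : m = c2.length) :
    ∀ (d : Nat) (i : Nat), 1 ≤ i → i + d = c1.length + 1 →
    (PySem.List.pyRange (i : Int) ((c1.length : Int) + 1) 1).foldl
      (fun st ii => rowsB k c1 c2 (m : Int) st ii)
      ((List.range i).map (rowL k c1 c2 m), rowC c1 c2 m (i - 1), rowF k c1 c2 m (i - 1))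
    = ((List.range (c1.length + 1)).map (rowL k c1 c2 m),
       rowC c1 c2 m c1.length, rowF k c1 c2 m c1.length) := by
  intro d
  induction d with
  | zero =>
    intro i hi1 hid
    have hi : i = c1.length + 1 := by omega
    subst hi
    rw [PySem.List.pyRange_one_eq_nil (by omega)]
    simp
  | succ d ih =>
    intro i hi1 hid
    rw [PySem.List.pyRange_one_cons (by omega)]
    simp only [List.foldl_cons]
    have hstep : rowsB k c1 c2 (m : Int)
        ((List.range i).map (rowL k c1 c2 m), rowC c1 c2 m (i - 1), rowF k c1 c2 m (i - 1)) (i : Int)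
        = ((List.range (i + 1)).map (rowL k c1 c2 m), rowC c1 c2 m i, rowF k c1 c2 m i) := by
      have hinit : (([0], [0], [0]) : List Int × List Int × List Int)
          = ((List.range 1).map (fun y => specL k c1 c2 i y),
             (List.range 1).map (fun y => specC c1 c2 i y),
             (List.range 1).map (fun y => if k ≤ specC c1 c2 i y then specF k c1 c2 i y else 0)) := by
        have h1 : specL k c1 c2 i 0 = 0 := specL_zero k c1 c2 i 0 (Or.inr rfl)
        have h2 : specC c1 c2 i 0 = 0 := specC_zero_right c1 c2 i
        simp [h1, h2, show ¬ k ≤ (0 : Int) by omega]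
      simp only [rowsB]
      rw [hinit]
      have hfold := rowB_fold k c1 c2 hk m hm i hi1 (by omega) _ rfl m 1 (by omega) (by omega)
      simp only [Nat.cast_one] at hfold
      rw [hfold]
      simp [List.range_succ]
    rw [hstep]
    have := ih (i + 1) (by omega) (by omega)
    rw [show ((i : Nat) : Int) + 1 = (((i + 1 : Nat)) : Int) by push_cast; ring] at *
    simpa using this

theorem portB_eq (k : Int) (s1 s2 : String) (hk : 1 ≤ k) :
    longestSubsequenceCommonSegment_alt k s1 s2
      = specL k s1.toList s2.toList s1.toList.length s2.toList.length := by
  set c1 := s1.toList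
  set c2 := s2.toList
  have hzL : List.replicate (((c2.length : Int)) + 1).toNat 0 = rowL k c1 c2 c2.length 0 := by
    rw [rowL]
    have e : (((c2.length : Int)) + 1).toNat = c2.length + 1 := by omega
    rw [e]
    apply List.ext_getElem <;> simp [specL_zero k c1 c2 0 _ (Or.inl rfl)]
  have hzC : List.replicate (((c2.length : Int)) + 1).toNat 0 = rowC c1 c2 c2.length 0 := by
    rw [rowC]
    have e : (((c2.length : Int)) + 1).toNat = c2.length + 1 := by omega
    rw [e]
    apply List.ext_getElem <;> simp [specC]
  have hzF : List.replicate (((c2.length : Int)) + 1).toNat 0 = rowF k c1 c2 c2.length 0 := by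
    rw [rowF]
    have e : (((c2.length : Int)) + 1).toNat = c2.length + 1 := by omega
    rw [e]
    apply List.ext_getElem <;> simp [show ¬ k ≤ (0:Int) by omega, specC]
  have hinit : ([List.replicate (((c2.length : Int)) + 1).toNat 0],
      List.replicate (((c2.length : Int)) + 1).toNat 0,
      List.replicate (((c2.length : Int)) + 1).toNat 0)
      = ((List.range 1).map (rowL k c1 c2 c2.length), rowC c1 c2 c2.length 0,
         rowF k c1 c2 c2.length 0) := by
    refine Prod.ext ?_ (Prod.ext ?_ ?_)
    · simp only [List.range_one, List.map_cons, List.map_nil]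
      rw [hzL]
    · exact hzC
    · exact hzF
  have h := outerB_fold k c1 c2 hk c2.length rfl (c1.length + 1 - 1) 1 (by omega) (by omega)
  simp only [Nat.cast_one, Nat.sub_self] at h
  unfold longestSubsequenceCommonSegment_alt
  show ((((PySem.List.pyRange 1 ((c1.length : Int) + 1) 1).foldl
      (fun st i => rowsB k c1 c2 (c2.length : Int) st i)
      ([List.replicate (((c2.length : Int)) + 1).toNat 0],
       List.replicate (((c2.length : Int)) + 1).toNat 0,
       List.replicate (((c2.length : Int)) + 1).toNat 0)).1).getD
      ((c1.length : Int)).toNat []).getD ((c2.length : Int)).toNat 0 = _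
  rw [hinit, h]
  rw [Int.toNat_natCast, Int.toNat_natCast, getD_range_map _ _ _ _ (by omega), rowL,
    getD_range_map _ _ _ _ (by omega)]

-- ===== empty-string cases (any k): both ports return 0 =====
theorem portA_left_empty (k : Int) (s2 : String) :
    longestSubsequenceCommonSegment k "" s2 = 0 := by
  simp only [longestSubsequenceCommonSegment, show ("" : String).toList = [] from rfl,
    List.length_nil, Nat.cast_zero, zero_add]
  rw [PySem.List.pyRange_one_eq_nil (by omega)]
  rfl

theorem rowA_m0 (k : Int) (c1 c2 : List Char)
    (l : List Int) (st : (Int → Int → Int) × (Int → Int → Int)) :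
    l.foldl (fun st i => rowA k c1 c2 0 i st) st = st := by
  induction l generalizing st with
  | nil => rfl
  | cons a l ih =>
    simp only [List.foldl_cons]
    rw [show rowA k c1 c2 0 a st = st by
      unfold rowA
      rw [PySem.List.pyRange_one_eq_nil (by omega)]
      rfl]
    exact ih st

theorem portA_right_empty (k : Int) (s1 : String) :
    longestSubsequenceCommonSegment k s1 "" = 0 := by
  simp only [longestSubsequenceCommonSegment, show ("" : String).toList = [] from rfl,
    List.length_nil, Nat.cast_zero]
  rw [rowA_m0 k s1.toList []]

theorem getD_zero_rows (rows : List (List Int)) (h : ∀ r ∈ rows, r = [0]) (x y : Nat) :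
    (rows.getD x []).getD y 0 = 0 := by
  rcases hx : rows.getD x [] with _ | ⟨a, t⟩
  · rfl
  · have hmem : (a :: t) ∈ rows := by
      rw [List.getD_eq_getElem?_getD] at hx
      rcases he : rows[x]? with _ | r
      · rw [he] at hx; simp at hx
      · rw [he] at hx
        simp only [Option.getD_some] at hx
        subst hx
        exact List.mem_of_getElem? he
    cases h _ hmem
    cases y <;> rfl

theorem foldB_m0 (k : Int) (c1 c2 : List Char)
    (l : List Int) (st : List (List Int) × List Int × List Int)
    (h : ∀ r ∈ st.1, r = [0]) :
    ∀ r ∈ (l.foldl (fun st i => rowsB k c1 c2 0 st i) st).1, r = [0] := by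
  induction l generalizing st with
  | nil => exact h
  | cons a l ih =>
    simp only [List.foldl_cons]
    refine ih _ ?_
    show ∀ r ∈ (rowsB k c1 c2 0 st a).1, r = [0]
    unfold rowsB
    rw [PySem.List.pyRange_one_eq_nil (by omega)]
    intro r hr
    simp only [List.foldl_nil, List.mem_append, List.mem_singleton] at hr
    rcases hr with hr | hr
    · exact h r hr
    · exact hr

theorem portB_right_empty (k : Int) (s1 : String) :
    longestSubsequenceCommonSegment_alt k s1 "" = 0 := by
  simp only [longestSubsequenceCommonSegment_alt, show ("" : String).toList = [] from rfl,
    List.length_nil, Nat.cast_zero, zero_add]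
  apply getD_zero_rows
  apply foldB_m0
  intro r hr
  simp only [List.mem_singleton] at hr
  subst hr
  rfl

theorem portB_left_empty (k : Int) (s2 : String) :
    longestSubsequenceCommonSegment_alt k "" s2 = 0 := by
  simp only [longestSubsequenceCommonSegment_alt, show ("" : String).toList = [] from rfl,
    List.length_nil, Nat.cast_zero, zero_add]
  rw [PySem.List.pyRange_one_eq_nil (by omega)]
  simp only [List.foldl_nil, Int.toNat_zero, List.getD_cons_zero]
  rw [List.getD_eq_getElem?_getD]
  rcases he : (List.replicate ((s2.toList.length : Int) + 1).toNat (0 : Int))[(s2.toList.length : Int).toNat]? with _ | r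
  · rfl
  · rw [List.eq_of_mem_replicate (List.mem_of_getElem? he)]
    rfl

-- ===== VERDICT (by name: the statement is the Claim_ definition above) =====
theorem longestSubsequenceCommonSegment_spec : Claim_equal_longestSubsequenceCommonSegment := by
  intro k s1 s2 _hdom hpre
  unfold Spec_longestSubsequenceCommonSegment
  by_cases hk : 1 ≤ k
  · rw [portA_eq k s1 s2 hk, portB_eq k s1 s2 hk]
  · rcases hpre with hk1 | h1 | h2
    · exact absurd hk1 hk
    · subst h1
      rw [portA_left_empty, portB_left_empty]
    · subst h2
      rw [portA_right_empty, portB_right_empty]
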